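-- pv_equiv track=rewrite | github.com/Rajn013/PPTassignment-16 | PPT assignment16.py | count_remaining_words
-- ===== SOURCE A (Python) =====
-- def count_remaining_words(sequence):
--     stack = []
--
--     for word in sequence:
--         if stack and stack[-1] == word:
--             stack.pop()
--         else:
--             stack.append(word)
--
--     return len(stack)
-- ===== SOURCE B (Python) =====
-- def count_remaining_words(sequence):
--     # Multi-pass: repeatedly scan, dropping adjacent equal pairs, until a pass removes nothing.
--     words = list(sequence)
--     changed = True
--     while changed:
--         changed = False
--         out = []
--         i = 0
--         n = len(words)
--         while i < n:
--             if i + 1 < n and words[i] == words[i + 1]: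
--                 i += 2
--                 changed = True
--             else:
--                 out.append(words[i])
--                 i += 1
--         words = out
--     return len(words)
-- ===== Notes on version B (the rewrite author's own statement) =====
-- stated objective: alternative
-- what changed: Replaces A's single-pass stack with repeated whole-list scans that drop adjacent equal pairs until a fixed point; equality of the final count follows from confluence of adjacent-pair cancellation.
import Mathlib
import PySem

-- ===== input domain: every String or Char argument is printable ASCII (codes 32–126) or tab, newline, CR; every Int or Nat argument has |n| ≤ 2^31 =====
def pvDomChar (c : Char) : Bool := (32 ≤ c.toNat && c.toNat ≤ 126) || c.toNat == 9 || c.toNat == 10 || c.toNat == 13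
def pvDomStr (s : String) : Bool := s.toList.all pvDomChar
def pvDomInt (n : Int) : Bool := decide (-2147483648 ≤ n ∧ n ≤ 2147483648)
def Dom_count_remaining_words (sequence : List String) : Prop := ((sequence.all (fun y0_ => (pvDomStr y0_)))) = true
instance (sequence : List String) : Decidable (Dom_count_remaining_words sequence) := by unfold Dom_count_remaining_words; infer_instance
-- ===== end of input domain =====

-- B is an ALTERNATIVE algorithm (repeated adjacent-pair-cancelling scans to a fixed point) with the
-- same result as A's one-pass stack; not faster.

-- ===== PORT A =====
-- The Python stack (append / pop / stack[-1] at the END) is represented with its top at the HEAD: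
-- 'stack and stack[-1] == word' is 'stack.head? = some word', pop is tail, append is cons.
def pvStep (stack : List String) (word : String) : List String :=
  if stack.head? = some word then stack.tail else word :: stack

def count_remaining_words (sequence : List String) : Int :=
  ((sequence.foldl pvStep []).length : Int)

-- ===== PORT B =====
-- one scan of Source B's inner while-loop: builds 'out' skipping adjacent equal pairs; Bool = 'changed'
def pvPass : List String → List String × Bool
  | a :: b :: t => if a = b then ((pvPass t).1, true)
                   else ((a :: (pvPass (b :: t)).1), (pvPass (b :: t)).2)
  | [x] => ([x], false)
  | [] => ([], false)

-- needed by pvFix's termination: a pass that set 'changed' shortened the list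
theorem pvPass_true_lt : ∀ t : List String, (pvPass t).2 = true → (pvPass t).1.length < t.length
  | a :: b :: t, h => by
    by_cases hab : a = b
    · simp only [pvPass, if_pos hab]
      rcases hc : (pvPass t).2 with _ | _
      · have h1 : (pvPass t).1.length = t.length := by
          clear h
          induction t with
          | nil => simp [pvPass]
          | cons x t ih =>
            cases t with
            | nil => simp [pvPass]
            | cons y t =>
              by_cases hxy : x = y
              · simp [pvPass, if_pos hxy] at hc
              · simp only [pvPass, if_neg hxy] at hc ⊢
                simp_all
        simp only [List.length_cons]; omega
      · have := pvPass_true_lt t hc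
        simp only [List.length_cons]; omega
    · simp only [pvPass, if_neg hab] at h ⊢
      have := pvPass_true_lt (b :: t) h
      simp only [List.length_cons] at this ⊢; omega
  | [x], h => by simp [pvPass] at h
  | [], h => by simp [pvPass] at h

-- Source B's outer while-loop: repeat the pass until 'changed' is false
def pvFix (t : List String) : List String :=
  if h : (pvPass t).2 = true then pvFix (pvPass t).1 else (pvPass t).1

termination_by t.length
decreasing_by exact pvPass_true_lt t h

def count_remaining_words_alt (sequence : List String) : Int :=
  ((pvFix sequence).length : Int)

-- ===== PRECONDITION & SPEC =====
def Spec_count_remaining_words (sequence : List String) (out : Int) : Prop := out = count_remaining_words_alt sequence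
instance (sequence : List String) (out : Int) : Decidable (Spec_count_remaining_words sequence out) := by unfold Spec_count_remaining_words; infer_instance

-- ===== CLAIM (what is proved, stated in full; the proofs are below) =====
def Claim_equal_count_remaining_words : Prop := ∀ (sequence : List String), Dom_count_remaining_words sequence → Spec_count_remaining_words sequence (count_remaining_words sequence)

-- ===== LEMMAS AND PROOFS =====

-- a stack arising in A never has two adjacent equal entries
theorem pvStep_chain {s : List String} (h : List.IsChain (· ≠ ·) s) (w : String) :
    List.IsChain (· ≠ ·) (pvStep s w) := by
  unfold pvStep
  split_ifs with hc
  · exact h.tail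
  · refine List.isChain_cons.mpr ⟨?_, h⟩
    intro y hy he
    rw [Option.mem_def] at hy
    exact hc (hy.trans (congrArg some he.symm))

-- pushing then cancelling (or cancelling then pushing) the same word is the identity
theorem pvStep_step {s : List String} (h : List.IsChain (· ≠ ·) s) (w : String) :
    pvStep (pvStep s w) w = s := by
  unfold pvStep
  cases s with
  | nil => simp
  | cons t s' =>
    by_cases htw : t = w
    · subst htw
      simp only [List.head?_cons, List.tail_cons, if_true]
      cases s' with
      | nil => simp
      | cons u s'' =>
        have htu : t ≠ u := by
          have := (List.isChain_cons.mp h).1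
          simpa using this
        simp [Ne.symm htu]
    · simp [htw]

-- one pass of B does not change A's stack fold (each dropped pair cancels exactly)
theorem pvPass_foldl : ∀ (t s : List String), List.IsChain (· ≠ ·) s →
    (pvPass t).1.foldl pvStep s = t.foldl pvStep s
  | a :: b :: t, s, hs => by
    by_cases hab : a = b
    · subst hab
      simp only [pvPass, List.foldl_cons, if_true]
      rw [pvStep_step hs]
      exact pvPass_foldl t s hs
    · simp only [pvPass, if_neg hab, List.foldl_cons]
      exact pvPass_foldl (b :: t) (pvStep s a) (pvStep_chain hs a)
  | [x], s, _ => by simp [pvPass]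
  | [], s, _ => by simp [pvPass]

-- a pass that changed nothing found no adjacent equal pair
theorem pvPass_false_chain : ∀ t : List String, (pvPass t).2 = false →
    List.IsChain (· ≠ ·) t
  | a :: b :: t, h => by
    by_cases hab : a = b
    · simp [pvPass, if_pos hab] at h
    · simp only [pvPass, if_neg hab] at h
      refine List.isChain_cons.mpr ⟨?_, pvPass_false_chain (b :: t) h⟩
      simpa using hab
  | [x], _ => by simp
  | [], _ => by simp

theorem pvPass_false_eq : ∀ t : List String, (pvPass t).2 = false → (pvPass t).1 = t
  | a :: b :: t, h => by
    by_cases hab : a = b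
    · simp [pvPass, if_pos hab] at h
    · simp only [pvPass, if_neg hab] at h ⊢
      simp [pvPass_false_eq (b :: t) h]
  | [x], _ => by simp [pvPass]
  | [], _ => by simp [pvPass]

-- the whole of B's outer loop keeps A's stack fold, and ends on an irreducible list
theorem pvFix_foldl (t : List String) :
    (pvFix t).foldl pvStep [] = t.foldl pvStep [] ∧ List.IsChain (· ≠ ·) (pvFix t) := by
  rw [pvFix]
  split_ifs with h
  · obtain ⟨h1, h2⟩ := pvFix_foldl (pvPass t).1
    exact ⟨h1.trans (pvPass_foldl t [] (by simp)), h2⟩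
  · have h' : (pvPass t).2 = false := by simpa using h
    rw [pvPass_false_eq t h']
    exact ⟨rfl, pvPass_false_chain t h'⟩
termination_by t.length
decreasing_by exact pvPass_true_lt t h

-- folding A's step over an irreducible list (with an irreducible boundary) just reverses it
theorem foldl_chain_reverse : ∀ (t s : List String),
    List.IsChain (· ≠ ·) (s.reverse ++ t) → t.foldl pvStep s = t.reverse ++ s := by
  intro t
  induction t with
  | nil => intro s _; simp
  | cons w t' ih =>
    intro s hs
    have hstep : pvStep s w = w :: s := by
      cases s with
      | nil => simp [pvStep]
      | cons u s' =>
        have hne : u ≠ w := by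
          rcases List.isChain_append.mp hs with ⟨-, -, hmid⟩
          exact hmid u (by simp) w (by simp)
        simp only [pvStep, List.head?_cons]
        rw [if_neg (by simpa using hne)]
    rw [List.foldl_cons, hstep, ih (w :: s) (by simpa [List.append_assoc] using hs)]
    simp

theorem foldl_length_of_fix (t : List String) :
    (t.foldl pvStep []).length = (pvFix t).length := by
  obtain ⟨h1, h2⟩ := pvFix_foldl t
  rw [← h1, foldl_chain_reverse (pvFix t) [] (by simpa using h2)]
  simp

-- ===== VERDICT (by name: the statement is the Claim_ definition above) =====
theorem count_remaining_words_spec : Claim_equal_count_remaining_words := by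
  intro sequence _
  unfold Spec_count_remaining_words count_remaining_words count_remaining_words_alt
  exact_mod_cast foldl_length_of_fix sequence
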